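-- pv_equiv track=rewrite | github.com/ppak10/RocketSmith | src/rocketsmith/prusaslicer/database.py | _resolve_preset
-- ===== SOURCE A (Python) =====
-- def _resolve_preset(
--     name: str,
--     sections: dict[str, dict[str, str]],
--     _visited: frozenset[str] = frozenset(),
-- ) -> dict[str, str]:
--     """
--     Recursively resolve a preset's settings by following its inherits chain.
--
--     Parents are merged left-to-right; the concrete preset's own keys win last.
--     Cycles are broken via the visited set.
--     """
--     if name in _visited or name not in sections:
--         return {}
--
--     _visited = _visited | {name}
--     own = sections[name].copy()
--     inherits_str = own.pop("inherits", None)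
--
--     if not inherits_str:
--         return own
--
--     merged: dict[str, str] = {}
--     for parent in (p.strip() for p in inherits_str.split(";") if p.strip()):
--         merged.update(_resolve_preset(parent, sections, _visited))
--
--     merged.update(own)
--     return merged
-- ===== SOURCE B (Python) =====
-- def _resolve_preset(
--     name: str,
--     sections: dict[str, dict[str, str]],
--     _visited: frozenset[str] = frozenset(),
-- ) -> dict[str, str]:
--     """
--     Two-phase resolution: flatten the inherits DAG into a postorder list of
--     contributing preset names (cycle-safe, per-path visited), then overlay
--     their settings left-to-right in one flat pass; own keys win last.
--     """
--
--     def collect(n: str, vis: frozenset[str]) -> list[str]: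
--         if n in vis:
--             return []
--         own = sections.get(n)
--         if own is None:
--             return []
--         parents = [q for q in (p.strip() for p in own.get("inherits", "").split(";")) if q]
--         sub = vis | {n}
--         return [m for p in parents for m in collect(p, sub)] + [n]
--
--     merged: dict[str, str] = {}
--     for n in collect(name, _visited):
--         for k, v in sections[n].items():
--             if k != "inherits":
--                 merged[k] = v
--     return merged
-- ===== Notes on version B (the rewrite author's own statement) =====
-- stated objective: alternative
-- what changed: A merges dicts during the recursion (each call builds parent dicts and re-merges them into an accumulator); B is two-phase: it first flattens the inherits DAG into a postorder list of contributing preset names (cycle-safe, per-path visited), then overlays their settings in one flat left-to-right pass with own keys last.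
import Mathlib
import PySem

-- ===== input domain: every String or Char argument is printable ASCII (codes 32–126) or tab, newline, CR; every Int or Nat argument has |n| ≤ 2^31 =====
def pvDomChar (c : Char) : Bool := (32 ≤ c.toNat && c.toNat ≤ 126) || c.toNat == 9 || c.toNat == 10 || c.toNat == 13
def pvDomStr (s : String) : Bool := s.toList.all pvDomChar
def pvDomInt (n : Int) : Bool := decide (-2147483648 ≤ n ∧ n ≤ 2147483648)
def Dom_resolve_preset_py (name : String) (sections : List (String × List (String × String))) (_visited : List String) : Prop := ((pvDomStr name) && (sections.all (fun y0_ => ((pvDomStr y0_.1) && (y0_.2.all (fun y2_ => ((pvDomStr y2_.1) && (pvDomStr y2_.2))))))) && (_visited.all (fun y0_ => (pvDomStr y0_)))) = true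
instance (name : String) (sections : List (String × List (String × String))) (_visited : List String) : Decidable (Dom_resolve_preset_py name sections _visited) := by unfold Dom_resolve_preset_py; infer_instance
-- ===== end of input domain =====

-- B separates traversal from merging: a postorder flatten of the inherits DAG followed by one
-- flat overlay pass (objective: alternative decomposition; A merges intermediate dicts during recursion).

-- termination measure for A's port: number of section keys not yet visited
def pvMeasure (sections : List (String × List (String × String))) (vis : List String) : Nat :=
  ((sections.map Prod.fst).filter (fun k => !vis.contains k)).length

theorem pvFiltLe (vis : List String) (name : String) :
    ∀ ks : List String,
      (ks.filter (fun k => !(vis ++ [name]).contains k)).length ≤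
        (ks.filter (fun k => !vis.contains k)).length := by
  intro ks
  induction ks with
  | nil => simp
  | cons k ks ih =>
    by_cases hv : k ∈ vis <;> by_cases hn : k = name <;>
      simp_all [List.filter_cons] <;> omega

theorem pvFiltLt (vis : List String) (name : String) (hn : vis.contains name = false) :
    ∀ ks : List String, name ∈ ks →
      (ks.filter (fun k => !(vis ++ [name]).contains k)).length <
        (ks.filter (fun k => !vis.contains k)).length := by
  intro ks hmem
  have hnv : name ∉ vis := by
    intro h
    rw [List.contains_iff_mem.mpr h] at hn
    cases hn
  induction ks with
  | nil => simp at hmem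
  | cons k ks ih =>
    have hLe := pvFiltLe vis name ks
    rcases List.mem_cons.mp hmem with h | h
    · rcases h
      simp_all [List.filter_cons]
    · have hlt := ih h
      by_cases hv : k ∈ vis <;> by_cases hkn : k = name <;>
        simp_all [List.filter_cons] <;> omega

theorem pvMeasure_lt (sections : List (String × List (String × String)))
    (vis : List String) (name : String)
    (h1 : vis.contains name = false)
    (h2 : (PySem.Dict.mk sections).contains name = true) :
    pvMeasure sections (PySem.Set.add vis name) < pvMeasure sections vis := by
  have hnm : name ∉ vis := by
    intro h; rw [List.contains_iff_mem.mpr h] at h1; cases h1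
  rw [PySem.Set.add_of_not_mem hnm]
  have hks : name ∈ sections.map Prod.fst := by
    simp only [PySem.Dict.contains, List.any_eq_true] at h2
    obtain ⟨p, hp, he⟩ := h2
    exact List.mem_map.mpr ⟨p, hp, by simpa using he⟩
  exact pvFiltLt vis name h1 _ hks

-- ===== PORT A =====
-- A: recursive resolution; the parents' resolved dicts are merged left-to-right into an
-- accumulator dict, then the preset's own settings (with 'inherits' popped) win last.
-- ';' is a nonempty separator, so split? never returns none; getD [] only discharges the Option.
mutual
def resolve_preset_py (name : String) (sections : List (String × List (String × String))) (_visited : List String) : List (String × String) :=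
  if h : _visited.contains name || !((PySem.Dict.mk sections).contains name) then []
  else
    let visited := PySem.Set.add _visited name
    let own0 : PySem.Dict String String := PySem.Dict.mk ((PySem.Dict.mk sections).getD name [])
    let inherits? := own0.get? "inherits"
    let own := own0.erase "inherits"
    match inherits? with
    | none => own.items
    | some s =>
      if s = "" then own.items
      else
        let parents := (((PySem.Str.split? s ";").getD []).map PySem.Str.strip).filter (fun p => p ≠ "")
        ((pvMergeParents parents sections visited PySem.Dict.empty).update own.items).items
termination_by (pvMeasure sections _visited, 0)
decreasing_by
  apply Prod.Lex.left
  have h1 : _visited.contains name = false := by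
    cases hcv : _visited.contains name
    · rfl
    · exact absurd (by rw [hcv]; rfl) h
  have h2 : (PySem.Dict.mk sections).contains name = true := by
    cases hcs : (PySem.Dict.mk sections).contains name
    · exact absurd (by rw [hcs, Bool.not_false, Bool.or_true]) h
    · rfl
  exact pvMeasure_lt sections _visited name h1 h2

-- the 'for parent in …: merged.update(_resolve_preset(parent, …))' loop of A
def pvMergeParents (parents : List String) (sections : List (String × List (String × String))) (visited : List String) (m : PySem.Dict String String) : PySem.Dict String String :=
  match parents with
  | [] => m
  | p :: ps => pvMergeParents ps sections visited (m.update (resolve_preset_py p sections visited))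
termination_by (pvMeasure sections visited, parents.length + 1)
decreasing_by
  · apply Prod.Lex.right
    simp only [List.length_cons]
    omega
  · apply Prod.Lex.right
    simp only [List.length_cons]
    omega
end

-- ===== PORT B =====
-- B phase 1: flatten the inherits DAG into the postorder list of contributing preset names.
-- pvParents: '[q for q in (p.strip() for p in own.get("inherits","").split(";")) if q]'
def pvParents (own : List (String × String)) : List String :=
  ((PySem.Str.split? ((PySem.Dict.mk own).getD "inherits" "") ";").getD []).filterMap
    (fun p => let q := PySem.Str.strip p; if q = "" then none else some q)

-- B's 'collect'; the Nat argument is fuel, a pure totality device (resolve_preset_py_alt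
-- supplies sections.length + 1, which pvCollect_fuel_irrelevant-style reasoning below shows
-- is never exhausted, since each recursive call strictly shrinks the unvisited section keys).
def pvCollect (sections : List (String × List (String × String))) : Nat → String → List String → List String
  | 0, _, _ => []
  | fuel + 1, n, vis =>
    if vis.contains n then []
    else
      match (PySem.Dict.mk sections).get? n with
      | none => []
      | some own =>
        (pvParents own).flatMap (fun p => pvCollect sections fuel p (PySem.Set.add vis n)) ++ [n]

-- B phase 2: one flat overlay pass over the collected names; 'inherits' entries are skipped
def resolve_preset_py_alt (name : String) (sections : List (String × List (String × String))) (_visited : List String) : List (String × String) :=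
  ((pvCollect sections (sections.length + 1) name _visited).foldl
    (fun m n =>
      ((PySem.Dict.mk sections).getD n []).foldl
        (fun m kv => if kv.1 ≠ "inherits" then m.insert kv.1 kv.2 else m) m)
    PySem.Dict.empty).items

-- ===== PRECONDITION & SPEC =====
-- boolean key-distinctness check (kept executable so Pre_ decides by evaluation)
def pvNodupB : List String → Bool
  | [] => true
  | k :: ks => !ks.contains k && pvNodupB ks

-- Pre_ requires each inner association list to have distinct keys — exactly the lists that
-- represent a Python dict (A's parameter type is dict[str, dict[str, str]], which cannot hold
-- duplicate keys); it excludes no input the Python function can receive.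
def Pre_resolve_preset_py (name : String) (sections : List (String × List (String × String))) (_visited : List String) : Prop :=
  sections.all (fun p => pvNodupB (p.2.map Prod.fst)) = true
instance (name : String) (sections : List (String × List (String × String))) (_visited : List String) : Decidable (Pre_resolve_preset_py name sections _visited) := by unfold Pre_resolve_preset_py; infer_instance

def pvWitness_resolve_preset_py : String × (List (String × List (String × String))) × List String :=
  ("a", [("a", [("inherits", "b"), ("k", "1")]), ("b", [("k", "0"), ("j", "2")])], [])

def Spec_resolve_preset_py (name : String) (sections : List (String × List (String × String))) (_visited : List String) (out : List (String × String)) : Prop := out = resolve_preset_py_alt name sections _visited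
instance (name : String) (sections : List (String × List (String × String))) (_visited : List String) (out : List (String × String)) : Decidable (Spec_resolve_preset_py name sections _visited out) := by unfold Spec_resolve_preset_py; infer_instance

-- ===== CLAIM (what is proved, stated in full; the proofs are below) =====
def Claim_equal_resolve_preset_py : Prop := ∀ (name : String) (sections : List (String × List (String × String))) (_visited : List String), Dom_resolve_preset_py name sections _visited → Pre_resolve_preset_py name sections _visited → Spec_resolve_preset_py name sections _visited (resolve_preset_py name sections _visited)

-- ===== LEMMAS AND PROOFS =====

theorem pvNodupB_iff : ∀ l : List String, pvNodupB l = true ↔ l.Nodup := by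
  intro l
  induction l with
  | nil => simp [pvNodupB]
  | cons k ks ih => simp [pvNodupB, List.nodup_cons, ih]


-- B's overlay of one preset's own settings onto a dict (the inner foldl of resolve_preset_py_alt)
def pvApplyOwn (sections : List (String × List (String × String))) (m : PySem.Dict String String) (n : String) : PySem.Dict String String :=
  ((PySem.Dict.mk sections).getD n []).foldl
    (fun m kv => if kv.1 ≠ "inherits" then m.insert kv.1 kv.2 else m) m

theorem pvAlt_eq (name : String) (sections : List (String × List (String × String))) (_visited : List String) :
    resolve_preset_py_alt name sections _visited =
      ((pvCollect sections (sections.length + 1) name _visited).foldl (pvApplyOwn sections) PySem.Dict.empty).items := rfl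

theorem pvInsert_comm (X : PySem.Dict String String) (k k' : String) (v v' : String)
    (hk : X.contains k = true) (hne : k' ≠ k) :
    (X.insert k' v').insert k v = (X.insert k v).insert k' v' := by
  by_cases hc' : X.contains k' = true
  · have e1 := PySem.Dict.items_insert_of_contains X (v := v') hc'
    have c1 : (X.insert k' v').contains k = true := by
      rw [PySem.Dict.contains_insert]; simp [hk]
    have e2 := PySem.Dict.items_insert_of_contains (X.insert k' v') (v := v) c1
    have c2 : (X.insert k v).contains k' = true := by
      rw [PySem.Dict.contains_insert]; simp [hc']
    have e3 := PySem.Dict.items_insert_of_contains X (v := v) hk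
    have e4 := PySem.Dict.items_insert_of_contains (X.insert k v) (v := v') c2
    apply PySem.Dict.ext
    rw [e2, e1, e4, e3, List.map_map, List.map_map]
    apply List.map_congr_left
    intro p _
    by_cases h1 : p.1 = k
    · simp [Function.comp, h1, Ne.symm hne]
    · by_cases h2 : p.1 = k' <;> simp [Function.comp, h1, h2, hne]
  · have hc'f : X.contains k' = false := by simpa using hc'
    have e1 := PySem.Dict.items_insert_of_not_contains X v' hc'f
    have c1 : (X.insert k' v').contains k = true := by
      rw [PySem.Dict.contains_insert]; simp [hk]
    have e2 := PySem.Dict.items_insert_of_contains (X.insert k' v') (v := v) c1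
    have e3 := PySem.Dict.items_insert_of_contains X (v := v) hk
    have c2 : (X.insert k v).contains k' = false := by
      rw [PySem.Dict.contains_insert]; simp [hc'f, hne]
    have e4 := PySem.Dict.items_insert_of_not_contains (X.insert k v) v' c2
    apply PySem.Dict.ext
    rw [e2, e1, e4, e3, List.map_append]
    simp [hne]

theorem pvInsert_update_comm (l : List (String × String)) :
    ∀ (X : PySem.Dict String String) (k v : String), X.contains k = true → k ∉ l.map Prod.fst →
      (X.update l).insert k v = (X.insert k v).update l := by
  induction l with
  | nil => intro X k v _ _; rfl
  | cons a l ih =>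
    intro X k v hk hnm
    have hne : a.1 ≠ k := by
      intro h; exact hnm (by simp [h])
    have h1 : (X.update (a :: l)) = (X.insert a.1 a.2).update l := rfl
    have h2 : (X.insert a.1 a.2).contains k = true := by
      rw [PySem.Dict.contains_insert]; simp [hk]
    rw [h1, ih _ _ _ h2 (by intro h; exact hnm (by simp [h])), pvInsert_comm _ _ _ _ _ hk hne]
    rfl

theorem pvSplit (k : String) :
    ∀ (items : List (String × String)), items.any (fun p => p.1 == k) = true →
      (items.map Prod.fst).Nodup →
      ∃ l₁ w l₂, items = l₁ ++ (k, w) :: l₂ ∧ (∀ p ∈ l₁, p.1 ≠ k) ∧ (∀ p ∈ l₂, p.1 ≠ k) := by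
  intro items
  induction items with
  | nil => simp
  | cons q items ih =>
    intro hany hnd
    by_cases hq : q.1 = k
    · refine ⟨[], q.2, items, ?_, by simp, ?_⟩
      · simp [← hq]
      · intro p hp hpk
        have : q.1 ∈ items.map Prod.fst := by
          rw [hq, ← hpk]; exact List.mem_map.mpr ⟨p, hp, rfl⟩
        exact (List.nodup_cons.mp hnd).1 this
    · have hany' : items.any (fun p => p.1 == k) = true := by
        rcases List.any_eq_true.mp hany with ⟨p, hp, he⟩
        rcases List.mem_cons.mp hp with rfl | hp'
        · exact absurd (by simpa using he) hq
        · exact List.any_eq_true.mpr ⟨p, hp', he⟩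
      obtain ⟨l₁, w, l₂, he, h1, h2⟩ := ih hany' (List.nodup_cons.mp hnd).2
      exact ⟨q :: l₁, w, l₂, by rw [he, List.cons_append], by
        intro p hp; rcases List.mem_cons.mp hp with rfl | hp'
        · exact hq
        · exact h1 p hp', h2⟩

theorem pvMapFix (k v : String) (L : List (String × String)) (h : ∀ p ∈ L, p.1 ≠ k) :
    L.map (fun p => if (p.1 == k) = true then (k, v) else p) = L := by
  conv_rhs => rw [← List.map_id L]
  apply List.map_congr_left
  intro p hp; simp [h p hp]

theorem pvUpdate_append (a : PySem.Dict String String) (x y : List (String × String)) :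
    a.update (x ++ y) = (a.update x).update y := by
  simp [PySem.Dict.update, List.foldl_append]

theorem pvUpdate_cons (a : PySem.Dict String String) (p : String × String) (x : List (String × String)) :
    a.update (p :: x) = (a.insert p.1 p.2).update x := rfl

theorem pvUpdate_items_insert (d a : PySem.Dict String String) (k v : String)
    (hd : d.keys.Nodup) :
    a.update ((d.insert k v).items) = (a.update d.items).insert k v := by
  by_cases hc : d.contains k = true
  · obtain ⟨l₁, w, l₂, he, h1, h2⟩ := pvSplit k d.items hc hd
    have hitems : (d.insert k v).items = l₁ ++ (k, v) :: l₂ := by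
      rw [PySem.Dict.items_insert_of_contains d v hc, he, List.map_append, List.map_cons,
        pvMapFix k v l₁ h1, pvMapFix k v l₂ h2]
      simp
    rw [hitems, he, pvUpdate_append, pvUpdate_append, pvUpdate_cons, pvUpdate_cons]
    rw [pvInsert_update_comm l₂ _ _ _ (PySem.Dict.contains_insert_self _ _ _)
        (by intro h; rcases List.mem_map.mp h with ⟨p, hp, hpk⟩; exact h2 p hp hpk),
      PySem.Dict.insert_insert_self]
  · rw [PySem.Dict.items_insert_of_not_contains d v (by simpa using hc), pvUpdate_append]
    rfl

theorem pvUpdate_items_update (e : List (String × String)) :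
    ∀ (d a : PySem.Dict String String), d.keys.Nodup →
      a.update ((d.update e).items) = (a.update d.items).update e := by
  induction e with
  | nil => intro d a _; rfl
  | cons p e ih =>
    intro d a hd
    have h1 : d.update (p :: e) = (d.insert p.1 p.2).update e := rfl
    rw [h1, ih _ _ (PySem.Dict.nodup_keys_insert d p.1 p.2 hd), pvUpdate_items_insert d a p.1 p.2 hd]
    rfl

theorem pvMergeNodup (sections : List (String × List (String × String))) (vis : List String) :
    ∀ (ps : List String) (m : PySem.Dict String String), m.keys.Nodup →
      (pvMergeParents ps sections vis m).keys.Nodup := by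
  intro ps
  induction ps with
  | nil => intro m hm; rw [pvMergeParents.eq_def]; exact hm
  | cons p rest ih =>
    intro m hm
    rw [pvMergeParents.eq_def]
    exact ih _ (PySem.Dict.nodup_keys_update m _ hm)

-- overlaying one preset's list with 'inherits' filtered out = B's skip-'inherits' fold
theorem pvOwn_step (sections : List (String × List (String × String))) (name : String)
    (m : PySem.Dict String String) :
    m.update (((PySem.Dict.mk ((PySem.Dict.mk sections).getD name [])).erase "inherits").items) =
      pvApplyOwn sections m name := by
  unfold pvApplyOwn
  show List.foldl _ m (((PySem.Dict.mk sections).getD name []).filter (fun p => !(p.1 == "inherits"))) = _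
  rw [List.foldl_filter]
  congr 1
  funext x y
  by_cases h : y.1 = "inherits" <;> simp [h]

-- B's comprehension (strip each chunk, keep nonempty) = A's map-then-filter
theorem pvFilterMap_eq (l : List String) :
    l.filterMap (fun p => let q := PySem.Str.strip p; if q = "" then none else some q) =
      (l.map PySem.Str.strip).filter (fun p => p ≠ "") := by
  induction l with
  | nil => rfl
  | cons x l ih =>
    simp only [List.filterMap_cons, List.map_cons, List.filter_cons]
    by_cases h : PySem.Str.strip x = "" <;> simp [h, ih]

theorem pvParents_eq (own : List (String × String)) :
    pvParents own =
      (((PySem.Str.split? ((PySem.Dict.mk own).getD "inherits" "") ";").getD []).map PySem.Str.strip).filter (fun p => p ≠ "") := by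
  unfold pvParents
  exact pvFilterMap_eq _

theorem pvNoParents : ((((PySem.Str.split? "" ";").getD []).map PySem.Str.strip).filter (fun p => p ≠ "")) = [] := by decide

theorem pvSecNodup (sections : List (String × List (String × String)))
    (hpre : ∀ p ∈ sections, (p.2.map Prod.fst).Nodup) (n : String) :
    (((PySem.Dict.mk sections).getD n []).map Prod.fst).Nodup := by
  unfold PySem.Dict.getD PySem.Dict.get?
  cases h : List.find? (fun p => p.1 == n) (PySem.Dict.mk sections).items with
  | none => simp [h]
  | some p =>
    simp only [h, Option.map_some, Option.getD_some]
    exact hpre p (List.mem_of_find?_eq_some h)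

-- A's parent-merge loop = B's flatMap of collected names, folded through pvApplyOwn
theorem pvKeyList (sections : List (String × List (String × String))) (vis : List String) (fuel : Nat)
    (IH : ∀ (n : String) (m : PySem.Dict String String),
        m.update (resolve_preset_py n sections vis) = (pvCollect sections fuel n vis).foldl (pvApplyOwn sections) m) :
    ∀ (ps : List String) (m a : PySem.Dict String String), m.keys.Nodup →
      a.update ((pvMergeParents ps sections vis m).items) =
        (ps.flatMap (fun p => pvCollect sections fuel p vis)).foldl (pvApplyOwn sections) (a.update m.items) := by
  intro ps
  induction ps with
  | nil =>
    intro m a _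
    rw [pvMergeParents.eq_def]
    simp only [List.flatMap_nil, List.foldl_nil]
  | cons p rest ih =>
    intro m a hm
    rw [pvMergeParents.eq_def]
    simp only [List.flatMap_cons, List.foldl_append]
    rw [ih _ _ (PySem.Dict.nodup_keys_update m _ hm),
      pvUpdate_items_update _ _ _ hm, IH p (a.update m.items)]

-- the central invariant: updating any dict with A's result = folding B's overlay over B's
-- postorder, for any fuel strictly above the count of unvisited section keys
theorem pvKey (sections : List (String × List (String × String)))
    (hpre : ∀ p ∈ sections, (p.2.map Prod.fst).Nodup) :
    ∀ (fuel : Nat) (vis : List String), pvMeasure sections vis < fuel →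
      ∀ (name : String) (m : PySem.Dict String String),
        m.update (resolve_preset_py name sections vis) =
          (pvCollect sections fuel name vis).foldl (pvApplyOwn sections) m := by
  intro fuel
  induction fuel with
  | zero => intro vis hfuel; omega
  | succ fuel ihf =>
    intro vis hfuel name m
    rw [resolve_preset_py.eq_def, pvCollect]
    by_cases hv : vis.contains name
    · rw [dif_pos (by rw [hv]; rfl), if_pos hv]
      simp [PySem.Dict.update]
    · have hvf : vis.contains name = false := by simpa using hv
      rw [if_neg hv]
      cases hcs : (PySem.Dict.mk sections).get? name with
      | none =>
        have hcf : (PySem.Dict.mk sections).contains name = false := by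
          rw [PySem.Dict.contains_eq_isSome_get?, hcs]; rfl
        rw [dif_pos (by rw [hvf, hcf]; rfl)]
        simp [PySem.Dict.update]
      | some own =>
        have hct : (PySem.Dict.mk sections).contains name = true := by
          rw [PySem.Dict.contains_eq_isSome_get?, hcs]; rfl
        rw [dif_neg (by rw [hvf, hct]; simp)]
        have hown : (PySem.Dict.mk sections).getD name [] = own := by
          rw [PySem.Dict.getD_eq_get?_getD, hcs]; rfl
        have hm := pvMeasure_lt sections vis name hvf hct
        have IH' : ∀ (n : String) (m : PySem.Dict String String),
            m.update (resolve_preset_py n sections (PySem.Set.add vis name)) =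
              (pvCollect sections fuel n (PySem.Set.add vis name)).foldl (pvApplyOwn sections) m :=
          fun n m => ihf (PySem.Set.add vis name) (by omega) n m
        simp only [List.foldl_append, List.foldl_cons, List.foldl_nil]
        rw [pvParents_eq, hown]
        cases hout : (PySem.Dict.mk own).get? "inherits" with
        | none =>
          have hgd : (PySem.Dict.mk own).getD "inherits" "" = "" := by
            rw [PySem.Dict.getD_eq_get?_getD, hout]; rfl
          simp only [hout, hgd, pvNoParents, List.flatMap_nil, List.foldl_nil]
          rw [← hown]; exact pvOwn_step sections name m
        | some s =>
          have hgd : (PySem.Dict.mk own).getD "inherits" "" = s := by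
            rw [PySem.Dict.getD_eq_get?_getD, hout]; rfl
          by_cases hs : s = ""
          · subst hs
            simp only [hout, hgd, if_pos rfl, pvNoParents, List.flatMap_nil, List.foldl_nil]
            rw [← hown]; exact pvOwn_step sections name m
          · simp only [hout, hgd, if_neg hs]
            rw [pvUpdate_items_update _ _ _
                (pvMergeNodup sections (PySem.Set.add vis name) _ PySem.Dict.empty
                  PySem.Dict.nodup_keys_empty),
              pvKeyList sections (PySem.Set.add vis name) fuel IH' _ PySem.Dict.empty m
                PySem.Dict.nodup_keys_empty]
            rw [← hown]; exact pvOwn_step sections name _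

theorem pvMeasure_le (sections : List (String × List (String × String))) (vis : List String) :
    pvMeasure sections vis ≤ sections.length := by
  unfold pvMeasure
  calc ((sections.map Prod.fst).filter _).length ≤ (sections.map Prod.fst).length :=
        List.length_filter_le _ _
    _ = sections.length := List.length_map ..

theorem pvNodupRes (sections : List (String × List (String × String)))
    (hpre : ∀ p ∈ sections, (p.2.map Prod.fst).Nodup) (vis : List String) (name : String) :
    ((resolve_preset_py name sections vis).map Prod.fst).Nodup := by
  have hsec := pvSecNodup sections hpre name
  have hfil : ((((PySem.Dict.mk ((PySem.Dict.mk sections).getD name [])).erase "inherits").items).map Prod.fst).Nodup := by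
    exact hsec.sublist (List.Sublist.map Prod.fst List.filter_sublist)
  rw [resolve_preset_py.eq_def]
  by_cases hc : (vis.contains name || !((PySem.Dict.mk sections).contains name)) = true
  · rw [dif_pos hc]; simp
  · rw [dif_neg hc]
    cases hout : (PySem.Dict.mk ((PySem.Dict.mk sections).getD name [])).get? "inherits" with
    | none => simpa only [hout] using hfil
    | some s =>
      by_cases hs : s = ""
      · simpa only [hout, if_pos hs] using hfil
      · simp only [hout, if_neg hs]
        exact PySem.Dict.nodup_keys_update _ _
          (pvMergeNodup sections (PySem.Set.add vis name) _ PySem.Dict.empty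
            PySem.Dict.nodup_keys_empty)

-- ===== VERDICT (by name: the statement is the Claim_ definition above) =====
theorem resolve_preset_py_spec : Claim_equal_resolve_preset_py := by
  intro name sections _visited _dom hpre
  have hpre' : ∀ p ∈ sections, (p.2.map Prod.fst).Nodup := by
    intro p hp
    exact (pvNodupB_iff _).mp ((List.all_eq_true.mp hpre) p hp)
  unfold Spec_resolve_preset_py
  rw [pvAlt_eq, ← pvKey sections hpre' (sections.length + 1) _visited
      (by have := pvMeasure_le sections _visited; omega) name PySem.Dict.empty]
  have hnd := pvNodupRes sections hpre' _visited name
  have hfresh := PySem.Dict.items_foldl_insert_fresh (resolve_preset_py name sections _visited)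
    Prod.fst Prod.snd PySem.Dict.empty (fun a _ => PySem.Dict.contains_empty a.1) hnd
  simpa [PySem.Dict.update, PySem.Dict.empty] using hfresh.symm
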